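-- pv_equiv track=rewrite | github.com/caozhichongchong/snp_finder | snp_finder/scripts/dnds.py | curate_SNP_type
-- ===== SOURCE A (Python) =====
-- def curate_SNP_type(SNP_genome_set):
--     # remove SNP type that is a subset of another SNP type
--     Major_alt_set = SNP_genome_set[-1]
--     SNP_genome_set = list(set(SNP_genome_set[:-1]))
--     SNP_total_length = len(Major_alt_set)
--     SNP_genome_set_diff = set()
--     for j in range(0, len(SNP_genome_set)):
--         newSNP = SNP_genome_set[j]
--         diff = ['%s %s'%(i, newSNP[i]) for i in range(0, SNP_total_length) if newSNP[i] != Major_alt_set[i]]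
--         SNP_genome_set_diff.add('\t'.join(diff))
--     total_count = 0
--     total_diff_length = len(SNP_genome_set_diff)
--     SNP_genome_set_diff = list(SNP_genome_set_diff)
--     for diff in SNP_genome_set_diff:
--         diff_SNP_position = [i for i in range(0, total_diff_length) if all(elem in SNP_genome_set_diff[i] for elem in diff)]
--         if len(diff_SNP_position) < 2:
--             # no other SNP type contains this SNP type
--             total_count += 1
--     return total_count
-- ===== SOURCE B (Python) =====
-- def curate_SNP_type(SNP_genome_set):
--     # inverted index: chars -> diff indices; a diff's containing types are the
--     # intersection of the posting sets of its characters
--     major = SNP_genome_set[-1]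
--     L = len(major)
--     diffs = list({'\t'.join('%s %s' % (i, s[i]) for i in range(L) if s[i] != major[i])
--                   for s in set(SNP_genome_set[:-1])})
--     occ = {}
--     for idx, d in enumerate(diffs):
--         for ch in d:
--             occ.setdefault(ch, set()).add(idx)
--     universe = set(range(len(diffs)))
--     total = 0
--     for d in diffs:
--         cand = universe
--         for ch in d:
--             cand = cand & occ.get(ch, set())
--         if len(cand) < 2:
--             total += 1
--     return total
-- ===== Notes on version B (the rewrite author's own statement) =====
-- stated objective: alternative
-- what changed: The quadratic per-pair scan that re-tests every character of every diff against every other diff string is replaced by an inverted index (character -> set of diff indices): the set of diff types containing a given diff is the intersection of the posting sets of its characters.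
import Mathlib
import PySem

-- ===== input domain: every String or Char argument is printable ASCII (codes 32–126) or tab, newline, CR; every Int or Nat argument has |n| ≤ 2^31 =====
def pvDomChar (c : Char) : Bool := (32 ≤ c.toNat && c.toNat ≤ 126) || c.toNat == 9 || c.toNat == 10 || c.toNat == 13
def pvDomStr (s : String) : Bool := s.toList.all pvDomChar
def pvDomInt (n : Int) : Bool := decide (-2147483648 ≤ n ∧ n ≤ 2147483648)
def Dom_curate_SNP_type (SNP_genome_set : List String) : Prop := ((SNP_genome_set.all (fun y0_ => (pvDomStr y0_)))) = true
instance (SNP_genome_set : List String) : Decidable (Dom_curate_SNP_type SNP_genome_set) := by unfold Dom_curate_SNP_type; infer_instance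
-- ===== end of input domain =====

-- B replaces A's per-pair character rescans by an inverted index (char -> posting set of diff
-- indices) whose posting sets are intersected; an alternative algorithm with the same return value.

-- ===== PORT A =====
-- literal port of A; 'elem in SNP_genome_set_diff[i]' is a one-character substring test, ported
-- exactly as PySem.Chars.isIn [elem] …
def curate_SNP_type (SNP_genome_set : List String) : Int :=
  let Major_alt_set : List Char := (PySem.List.pyGetD SNP_genome_set (-1) "").toList
  let rest : List String := PySem.Set.ofList (PySem.List.slice SNP_genome_set none (some (-1)))
  let SNP_total_length : Int := PySem.Chars.len Major_alt_set
  let diffset : PySem.Set (List Char) :=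
    (PySem.List.pyRange 0 (PySem.List.len rest)).foldl (fun acc j =>
      let newSNP : List Char := (PySem.List.pyGetD rest j "").toList
      let diff : List (List Char) :=
        ((PySem.List.pyRange 0 SNP_total_length).filter
          (fun i => PySem.List.pyGetD newSNP i ' ' != PySem.List.pyGetD Major_alt_set i ' ')).map
          (fun i => PySem.Int.toChars i ++ [' '] ++ [PySem.List.pyGetD newSNP i ' '])
      PySem.Set.add acc (PySem.Chars.join ['\t'] diff)) PySem.Set.empty
  let total_diff_length : Int := PySem.Set.len diffset
  let SNP_genome_set_diff : List (List Char) := diffset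
  SNP_genome_set_diff.foldl (fun total_count diff =>
    let diff_SNP_position : List Int :=
      (PySem.List.pyRange 0 total_diff_length).filter
        (fun i => diff.all (fun elem =>
          PySem.Chars.isIn [elem] (PySem.List.pyGetD SNP_genome_set_diff i [])))
    if PySem.List.len diff_SNP_position < 2 then total_count + 1 else total_count) 0

-- ===== PORT B =====
def curate_SNP_type_alt (SNP_genome_set : List String) : Int :=
  let major : List Char := (PySem.List.pyGetD SNP_genome_set (-1) "").toList
  let L : Int := PySem.Chars.len major
  let diffs : List (List Char) :=
    (PySem.Set.ofList (PySem.List.slice SNP_genome_set none (some (-1)))).foldl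
      (fun acc s =>
        PySem.Set.add acc (PySem.Chars.join ['\t']
          (((PySem.List.pyRange 0 L).filter
              (fun i => PySem.List.pyGetD s.toList i ' ' != PySem.List.pyGetD major i ' ')).map
            (fun i => PySem.Int.toChars i ++ [' '] ++ [PySem.List.pyGetD s.toList i ' ']))))
      PySem.Set.empty
  let occ : PySem.Dict Char (PySem.Set Int) :=
    (PySem.List.enumerate diffs).foldl (fun d p =>
      p.2.foldl (fun d ch =>
        PySem.Dict.modify d ch PySem.Set.empty (fun s => PySem.Set.add s p.1)) d)
      PySem.Dict.empty
  let univ_ : PySem.Set Int := PySem.Set.ofList (PySem.List.pyRange 0 (PySem.List.len diffs))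
  diffs.foldl (fun total d =>
    let cand := d.foldl (fun cand ch =>
      PySem.Set.inter cand (PySem.Dict.getD occ ch PySem.Set.empty)) univ_
    if PySem.Set.len cand < 2 then total + 1 else total) 0

-- ===== PRECONDITION & SPEC =====
-- Pre_ excludes exactly the inputs where A raises: the empty list (IndexError on [-1]) and lists
-- where some non-last string is shorter than the last one (IndexError on newSNP[i]).
def Pre_curate_SNP_type (SNP_genome_set : List String) : Prop :=
  SNP_genome_set ≠ [] ∧
    ∀ s ∈ SNP_genome_set.dropLast, (SNP_genome_set.getLastD "").length ≤ s.length
instance (SNP_genome_set : List String) : Decidable (Pre_curate_SNP_type SNP_genome_set) := by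
  unfold Pre_curate_SNP_type; infer_instance

def pvWitness_curate_SNP_type : List String := ["AG", "GG", "AG"]

def Spec_curate_SNP_type (SNP_genome_set : List String) (out : Int) : Prop := out = curate_SNP_type_alt SNP_genome_set
instance (SNP_genome_set : List String) (out : Int) : Decidable (Spec_curate_SNP_type SNP_genome_set out) := by unfold Spec_curate_SNP_type; infer_instance

-- ===== CLAIM (what is proved, stated in full; the proofs are below) =====
def Claim_equal_curate_SNP_type : Prop := ∀ (SNP_genome_set : List String), Dom_curate_SNP_type SNP_genome_set → Pre_curate_SNP_type SNP_genome_set → Spec_curate_SNP_type SNP_genome_set (curate_SNP_type SNP_genome_set)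

-- ===== LEMMAS AND PROOFS =====

-- membership in the posting set after indexing one diff string
theorem pv_inner_occ (l : List Char) (d : PySem.Dict Char (PySem.Set Int)) (idx i : Int) (c : Char) :
    i ∈ (l.foldl (fun d ch =>
          PySem.Dict.modify d ch PySem.Set.empty (fun s => PySem.Set.add s idx)) d).getD c PySem.Set.empty ↔
      i ∈ d.getD c PySem.Set.empty ∨ (c ∈ l ∧ i = idx) := by
  induction l generalizing d with
  | nil => simp
  | cons ch t ih =>
    simp only [List.foldl_cons, ih, PySem.Dict.getD_modify, List.mem_cons]
    by_cases h : c = ch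
    · subst h; simp [PySem.Set.mem_add]; tauto
    · simp [h]

-- membership in the posting set after the whole enumerate fold
theorem pv_outer_occ (ps : List (Int × List Char)) (d : PySem.Dict Char (PySem.Set Int)) (i : Int) (c : Char) :
    i ∈ (ps.foldl (fun d p =>
          p.2.foldl (fun d ch =>
            PySem.Dict.modify d ch PySem.Set.empty (fun s => PySem.Set.add s p.1)) d) d).getD c PySem.Set.empty ↔
      i ∈ d.getD c PySem.Set.empty ∨ ∃ p ∈ ps, p.1 = i ∧ c ∈ p.2 := by
  induction ps generalizing d with
  | nil => simp
  | cons p t ih =>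
    simp only [List.foldl_cons, ih, pv_inner_occ, List.mem_cons]
    constructor
    · rintro (((h | ⟨hc, hi⟩)) | ⟨q, hq, h1, h2⟩)
      · exact Or.inl h
      · exact Or.inr ⟨p, Or.inl rfl, hi.symm, hc⟩
      · exact Or.inr ⟨q, Or.inr hq, h1, h2⟩
    · rintro (h | ⟨q, (rfl | hq), h1, h2⟩)
      · exact Or.inl (Or.inl h)
      · exact Or.inl (Or.inr ⟨h2, h1.symm⟩)
      · exact Or.inr ⟨q, hq, h1, h2⟩

theorem pv_mem_enumerate (xs : List (List Char)) (n : Int) (p : Int × List Char) :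
    p ∈ PySem.List.enumerate xs n ↔ ∃ k : Nat, k < xs.length ∧ p.1 = n + k ∧ ∃ h : k < xs.length, p.2 = xs[k] := by
  induction xs generalizing n with
  | nil => simp [PySem.List.enumerate]
  | cons x t ih =>
    simp only [PySem.List.enumerate, List.mem_cons, ih]
    constructor
    · rintro (rfl | ⟨k, hk, h1, hk', h2⟩)
      · exact ⟨0, by simp, by simp, by simp, by simp⟩
      · exact ⟨k + 1, by simpa using hk, by push_cast [h1]; ring, by simpa using hk', by simpa using h2⟩
    · rintro ⟨k, hk, h1, hk', h2⟩
      cases k with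
      | zero => left; cases p; simp_all
      | succ k =>
        right
        exact ⟨k, by simpa using hk, by push_cast [h1]; ring, by simpa using hk', by simpa using h2⟩

-- the fold of intersections is a filter of the start set
theorem pv_cand_filter (d : List Char) (occ : PySem.Dict Char (PySem.Set Int)) (u : List Int) :
    d.foldl (fun cand ch =>
        PySem.Set.inter cand (PySem.Dict.getD occ ch PySem.Set.empty)) u =
      u.filter (fun i => d.all (fun ch =>
        (PySem.Dict.getD occ ch PySem.Set.empty).contains i)) := by
  induction d generalizing u with
  | nil => simp
  | cons c t ih =>
    rw [List.foldl_cons, ih]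
    simp only [PySem.Set.inter, List.filter_filter]
    apply List.filter_congr
    intro i _
    simp [List.all_cons, Bool.and_comm]


-- the inverted index's posting set for character c holds exactly the indices of diffs containing c
theorem pv_occ_mem (diffs : List (List Char)) (i : Int) (c : Char) :
    i ∈ (((PySem.List.enumerate diffs).foldl (fun d p =>
            p.2.foldl (fun d ch =>
              PySem.Dict.modify d ch PySem.Set.empty (fun s => PySem.Set.add s p.1)) d)
          PySem.Dict.empty).getD c PySem.Set.empty) ↔
      ∃ k : Nat, k < diffs.length ∧ i = (k : Int) ∧ ∃ h : k < diffs.length, c ∈ diffs[k] := by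
  rw [pv_outer_occ]
  constructor
  · rintro (h | ⟨p, hp, h1, h2⟩)
    · simp [PySem.Dict.getD, PySem.Dict.get?, PySem.Dict.empty] at h
    · obtain ⟨k, hk, e1, hk', e2⟩ := (pv_mem_enumerate _ _ _).1 hp
      exact ⟨k, hk, by omega, hk', e2 ▸ h2⟩
  · rintro ⟨k, hk, rfl, hk', hc⟩
    exact Or.inr ⟨((k : Int), diffs[k]),
      (pv_mem_enumerate _ _ _).2 ⟨k, hk, by simp, hk', rfl⟩, rfl, hc⟩

-- the counting phases of the two ports agree on any list of diff strings
theorem pv_count_eq (diffs : List (List Char)) :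
    diffs.foldl (fun (total_count : Int) diff =>
      if PySem.List.len ((PySem.List.pyRange 0 (PySem.Set.len diffs)).filter
            (fun i => diff.all (fun elem =>
              PySem.Chars.isIn [elem] (PySem.List.pyGetD diffs i [])))) < 2
      then total_count + 1 else total_count) (0 : Int) =
    diffs.foldl (fun (total : Int) d =>
      if PySem.Set.len (d.foldl (fun cand ch =>
            PySem.Set.inter cand (PySem.Dict.getD
              ((PySem.List.enumerate diffs).foldl (fun d p =>
                p.2.foldl (fun d ch =>
                  PySem.Dict.modify d ch PySem.Set.empty (fun s => PySem.Set.add s p.1)) d)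
                PySem.Dict.empty) ch PySem.Set.empty))
          (PySem.Set.ofList (PySem.List.pyRange 0 (PySem.List.len diffs)))) < 2
      then total + 1 else total) (0 : Int) := by
  have hfun : (fun (total_count : Int) (diff : List Char) =>
      if PySem.List.len ((PySem.List.pyRange 0 (PySem.Set.len diffs)).filter
            (fun i => diff.all (fun elem =>
              PySem.Chars.isIn [elem] (PySem.List.pyGetD diffs i [])))) < 2
      then total_count + 1 else total_count) =
      (fun (total : Int) (d : List Char) =>
      if PySem.Set.len (d.foldl (fun cand ch =>
            PySem.Set.inter cand (PySem.Dict.getD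
              ((PySem.List.enumerate diffs).foldl (fun d p =>
                p.2.foldl (fun d ch =>
                  PySem.Dict.modify d ch PySem.Set.empty (fun s => PySem.Set.add s p.1)) d)
                PySem.Dict.empty) ch PySem.Set.empty))
          (PySem.Set.ofList (PySem.List.pyRange 0 (PySem.List.len diffs)))) < 2
      then total + 1 else total) := by
    funext total d
    apply if_congr _ rfl rfl
    rw [pv_cand_filter,
      PySem.Set.ofList_eq_self_of_nodup _ (PySem.List.nodup_pyRange_one _ _)]
    simp only [PySem.Set.len, PySem.List.len]
    have hfilter : (PySem.List.pyRange 0 ((diffs.length : Int))).filter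
          (fun i => d.all (fun elem =>
            PySem.Chars.isIn [elem] (PySem.List.pyGetD diffs i []))) =
        (PySem.List.pyRange 0 ((diffs.length : Int))).filter
          (fun i => d.all (fun ch =>
            (((PySem.List.enumerate diffs).foldl (fun d p =>
                p.2.foldl (fun d ch =>
                  PySem.Dict.modify d ch PySem.Set.empty (fun s => PySem.Set.add s p.1)) d)
              PySem.Dict.empty).getD ch PySem.Set.empty).contains i)) := by
      apply List.filter_congr
      intro i hi
      obtain ⟨h0, hK⟩ := PySem.List.mem_pyRange_one.mp hi
      rw [Bool.eq_iff_iff, List.all_eq_true, List.all_eq_true]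
      apply forall_congr'; intro e; apply imp_congr_right; intro _
      rw [PySem.Chars.isIn_iff_infix, List.singleton_infix_iff,
        PySem.List.pyGetD_eq_getElem _ _ h0 (by exact_mod_cast hK),
        PySem.Set.contains_iff, pv_occ_mem]
      constructor
      · intro hmem
        exact ⟨i.toNat, by omega, by omega, by omega, hmem⟩
      · rintro ⟨k, hk, hik, hk', hc⟩
        have hik' : i.toNat = k := by omega
        simp only [hik']; exact hc
    rw [hfilter]
  exact congrArg (fun f => List.foldl f (0 : Int) diffs) hfun

theorem curate_SNP_type_eq (SNP_genome_set : List String) :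
    curate_SNP_type SNP_genome_set = curate_SNP_type_alt SNP_genome_set := by
  simp only [curate_SNP_type, curate_SNP_type_alt]
  rw [PySem.List.foldl_pyRange_pyGetD
    (PySem.Set.ofList (PySem.List.slice SNP_genome_set none (some (-1)))) ""
    (fun acc s => PySem.Set.add acc (PySem.Chars.join ['\t']
      (((PySem.List.pyRange 0 (PySem.Chars.len (PySem.List.pyGetD SNP_genome_set (-1) "").toList)).filter
          (fun i => PySem.List.pyGetD s.toList i ' ' != PySem.List.pyGetD (PySem.List.pyGetD SNP_genome_set (-1) "").toList i ' ')).map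
        (fun i => PySem.Int.toChars i ++ [' '] ++ [PySem.List.pyGetD s.toList i ' ']))))
    PySem.Set.empty le_rfl]
  simp only [Int.toNat_zero, List.drop_zero]
  exact pv_count_eq _

-- ===== VERDICT (by name: the statement is the Claim_ definition above) =====
theorem curate_SNP_type_spec : Claim_equal_curate_SNP_type := by
  intro S _ _
  unfold Spec_curate_SNP_type
  exact curate_SNP_type_eq S
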